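-- pv_equiv track=rewrite | github.com/MD-Levitan/neuro_crypt | utils.py | calculate_np
-- ===== SOURCE A (Python) =====
-- def calculate_np(n_layers: int, n_params: list(), input_size: int, output_size: int):
--     layer = input_size
--     np = 0
--     for i in range(0, n_layers):
--        np += layer * n_params[i]
--        layer = n_params[i]
--     np += layer * output_size
--     return np
-- ===== SOURCE B (Python) =====
-- def calculate_np(n_layers: int, n_params: list(), input_size: int, output_size: int):
--     sizes = [input_size] + [n_params[i] for i in range(n_layers)] + [output_size]
--
--     def chain(lo, hi):
--         # total parameters of the sub-chain sizes[lo..hi]: sum of sizes[i]*sizes[i+1], lo <= i < hi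
--         if hi - lo == 1:
--             return sizes[lo] * sizes[lo + 1]
--         mid = (lo + hi) // 2
--         return chain(lo, mid) + chain(mid, hi)
--
--     return chain(0, len(sizes) - 1)
-- ===== Notes on version B (the rewrite author's own statement) =====
-- stated objective: alternative
-- what changed: Replaces A's left-to-right rolling (layer, np) accumulator loop with a divide-and-conquer recursion that splits the explicit chain of layer sizes in half and sums the parameter counts of the two sub-chains.
import Mathlib
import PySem

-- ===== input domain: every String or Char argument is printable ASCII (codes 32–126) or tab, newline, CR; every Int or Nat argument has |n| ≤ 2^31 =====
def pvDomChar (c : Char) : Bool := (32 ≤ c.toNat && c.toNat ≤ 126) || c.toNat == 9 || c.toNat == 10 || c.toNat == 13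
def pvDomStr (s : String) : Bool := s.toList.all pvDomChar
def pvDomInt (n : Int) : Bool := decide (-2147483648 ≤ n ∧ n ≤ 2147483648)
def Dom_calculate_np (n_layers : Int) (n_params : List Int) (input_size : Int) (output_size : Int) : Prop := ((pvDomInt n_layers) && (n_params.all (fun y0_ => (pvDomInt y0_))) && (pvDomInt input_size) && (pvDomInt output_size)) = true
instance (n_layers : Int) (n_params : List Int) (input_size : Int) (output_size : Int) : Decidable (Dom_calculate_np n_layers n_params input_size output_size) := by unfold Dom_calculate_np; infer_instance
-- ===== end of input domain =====

-- B replaces A's rolling (layer, np) accumulator loop with a divide-and-conquer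
-- recursion over the explicit chain of layer sizes (objective: alternative).

-- ===== PORT A =====
-- loop state: (layer, np); n_params[i] read via pyGetD (in range under Pre_)
def calculate_np (n_layers : Int) (n_params : List Int) (input_size : Int) (output_size : Int) : Int :=
  let s := (PySem.List.pyRange 0 n_layers 1).foldl
    (fun (st : Int × Int) i => (PySem.List.pyGetD n_params i 0, st.2 + st.1 * PySem.List.pyGetD n_params i 0))
    (input_size, 0)
  s.2 + s.1 * output_size

-- ===== PORT B =====
-- chain(lo, hi): every call keeps 1 ≤ hi - lo and hi ≤ len sizes - 1; the Python base test
-- 'hi - lo == 1' is written 'hi - lo ≤ 1' only so Lean sees termination on the unreachable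
-- hi ≤ lo case; indices lo, lo+1 are always in range, so sizes[..] is List.getD.
def pvChain (sizes : List Int) (lo hi : Nat) : Int :=
  if hi - lo ≤ 1 then
    sizes.getD lo 0 * sizes.getD (lo + 1) 0
  else
    pvChain sizes lo ((lo + hi) / 2) + pvChain sizes ((lo + hi) / 2) hi
termination_by hi - lo
decreasing_by all_goals omega

-- sizes = [input_size] + [n_params[i] for i in range(n_layers)] + [output_size]; chain(0, len(sizes)-1)
def calculate_np_alt (n_layers : Int) (n_params : List Int) (input_size : Int) (output_size : Int) : Int :=
  let sizes := input_size :: ((PySem.List.pyRange 0 n_layers 1).map (fun i => PySem.List.pyGetD n_params i 0)) ++ [output_size]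
  pvChain sizes 0 (sizes.length - 1)

-- ===== PRECONDITION & SPEC =====
-- A (and B) raise IndexError iff n_layers > len(n_params); Pre_ excludes exactly that.
def Pre_calculate_np (n_layers : Int) (n_params : List Int) (input_size : Int) (output_size : Int) : Prop :=
  n_layers ≤ (n_params.length : Int)
instance (n_layers : Int) (n_params : List Int) (input_size : Int) (output_size : Int) : Decidable (Pre_calculate_np n_layers n_params input_size output_size) := by unfold Pre_calculate_np; infer_instance
def pvWitness_calculate_np : Int × List Int × Int × Int := (2, [3, 4], 5, 6)

def Spec_calculate_np (n_layers : Int) (n_params : List Int) (input_size : Int) (output_size : Int) (out : Int) : Prop := out = calculate_np_alt n_layers n_params input_size output_size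
instance (n_layers : Int) (n_params : List Int) (input_size : Int) (output_size : Int) (out : Int) : Decidable (Spec_calculate_np n_layers n_params input_size output_size out) := by unfold Spec_calculate_np; infer_instance

-- ===== CLAIM (what is proved, stated in full; the proofs are below) =====
def Claim_equal_calculate_np : Prop := ∀ (n_layers : Int) (n_params : List Int) (input_size : Int) (output_size : Int), Dom_calculate_np n_layers n_params input_size output_size → Pre_calculate_np n_layers n_params input_size output_size → Spec_calculate_np n_layers n_params input_size output_size (calculate_np n_layers n_params input_size output_size)

-- ===== LEMMAS AND PROOFS =====

-- adjacent-pair sum over indices [lo, hi)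
def pvPairSum (sizes : List Int) (lo n : Nat) : Int :=
  ((List.range' lo n).map (fun i => sizes.getD i 0 * sizes.getD (i + 1) 0)).sum

-- chain computes the adjacent-pair sum of its index interval
theorem pvChain_eq_pairSum (sizes : List Int) : ∀ n lo hi, hi - lo = n → lo < hi →
    pvChain sizes lo hi = pvPairSum sizes lo (hi - lo) := by
  intro n
  induction n using Nat.strong_induction_on with
  | _ n ih =>
    intro lo hi hn hlt
    rw [pvChain]
    by_cases h1 : hi - lo ≤ 1
    · have : hi - lo = 1 := by omega
      simp [pvPairSum, this]
    · rw [if_neg h1]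
      have hm1 : lo < (lo + hi) / 2 := by omega
      have hm2 : (lo + hi) / 2 < hi := by omega
      rw [ih ((lo + hi) / 2 - lo) (by omega) lo ((lo + hi) / 2) rfl hm1,
          ih (hi - (lo + hi) / 2) (by omega) ((lo + hi) / 2) hi rfl hm2]
      unfold pvPairSum
      rw [← List.sum_append, ← List.map_append]
      have hsplit : List.range' lo (hi - lo)
          = List.range' lo ((lo + hi) / 2 - lo) ++ List.range' ((lo + hi) / 2) (hi - (lo + hi) / 2) := by
        rw [show hi - lo = ((lo + hi) / 2 - lo) + (hi - (lo + hi) / 2) by omega, ← List.range'_append]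
        congr 2
        omega
      rw [hsplit]

-- peel the first index off an adjacent-pair sum
theorem pvPairSum_succ (s : List Int) (lo n : Nat) :
    pvPairSum s lo (n + 1) = s.getD lo 0 * s.getD (lo + 1) 0 + pvPairSum s (lo + 1) n := by
  unfold pvPairSum
  rw [List.range'_succ]
  simp

-- getD through a drop equation
theorem pv_getD_of_drop (s u : List Int) (lo k : Nat) (h : s.drop lo = u) :
    s.getD (lo + k) 0 = u.getD k 0 := by
  subst h
  simp [List.getD, List.getElem?_drop]

-- A's rolling fold over layer-size list L equals the adjacent-pair sum,
-- stated against any ambient list s whose suffix at lo is input :: L ++ [out]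
theorem pv_fold_eq_pairSum (s : List Int) : ∀ (L : List Int) (lo : Nat) (input np out : Int),
    s.drop lo = input :: L ++ [out] →
    (L.foldl (fun (st : Int × Int) x => (x, st.2 + st.1 * x)) (input, np)).2
      + (L.foldl (fun (st : Int × Int) x => (x, st.2 + st.1 * x)) (input, np)).1 * out
    = np + pvPairSum s lo (L.length + 1) := by
  intro L
  induction L with
  | nil =>
    intro lo input np out h
    have h0 : s.getD (lo + 0) 0 = input := by rw [pv_getD_of_drop s _ lo 0 h]; rfl
    have h1 : s.getD (lo + 1) 0 = out := by rw [pv_getD_of_drop s _ lo 1 h]; rfl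
    simp only [Nat.add_zero] at h0
    unfold pvPairSum
    simp only [List.foldl_nil, List.range'_one, List.map_cons, List.map_nil, List.sum_cons,
      List.sum_nil, List.length_nil, Nat.zero_add, add_zero]
    rw [h0, h1]
  | cons x t ih =>
    intro lo input np out h
    have hdrop : s.drop (lo + 1) = x :: t ++ [out] := by
      have hd : (s.drop lo).drop 1 = s.drop (lo + 1) := by rw [List.drop_drop, Nat.add_comm]
      rw [← hd, h]; rfl
    have h0 : s.getD (lo + 0) 0 = input := by rw [pv_getD_of_drop s _ lo 0 h]; rfl
    have h1 : s.getD (lo + 1) 0 = x := by rw [pv_getD_of_drop s _ lo 1 h]; rfl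
    simp only [Nat.add_zero] at h0
    simp only [List.foldl_cons, List.length_cons]
    rw [ih (lo + 1) x (np + input * x) out hdrop, pvPairSum_succ s lo (t.length + 1), h0, h1]
    ring

theorem calculate_np_eq (n_layers : Int) (n_params : List Int) (input_size : Int) (output_size : Int) :
    calculate_np n_layers n_params input_size output_size
      = calculate_np_alt n_layers n_params input_size output_size := by
  unfold calculate_np calculate_np_alt
  set L := (PySem.List.pyRange 0 n_layers 1).map (fun i => PySem.List.pyGetD n_params i 0) with hL
  set s := input_size :: L ++ [output_size] with hs
  have hlen : s.length - 1 = L.length + 1 := by simp [hs]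
  have hfold := pv_fold_eq_pairSum s L 0 input_size 0 output_size (by simp [hs])
  rw [List.foldl_map] at hfold
  rw [pvChain_eq_pairSum s (s.length - 1 - 0) 0 (s.length - 1) rfl (by simp [hs])]
  simp only [Nat.sub_zero, hlen]
  simpa using hfold

-- ===== VERDICT (by name: the statement is the Claim_ definition above) =====
theorem calculate_np_spec : Claim_equal_calculate_np := by
  intro n_layers n_params input_size output_size _ _
  exact calculate_np_eq n_layers n_params input_size output_size
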